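-- pv_equiv track=rewrite | github.com/f4pga/prjxray | fuzzers/034-cmt-pll-pips/fixup_and_group.py | find_common_bits_for_tag_groups
-- ===== SOURCE A (Python) =====
-- def find_common_bits_for_tag_groups(segbits, tag_groups):
--     """
--     For each tag group finds a common set of bits that have value of one.
--     """
--
--     bit_groups = []
--
--     for tag_group in tag_groups:
--         bit_group = set()
--
--         for tag, bits in segbits.items():
--             if tag in tag_group:
--                 ones = set([b for b in bits if b[2]])
--                 bit_group |= ones
--
--         bit_groups.append(bit_group)
--
--     return bit_groups
-- ===== SOURCE B (Python) =====
-- def find_common_bits_for_tag_groups(segbits, tag_groups):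
--     """
--     For each tag group finds a common set of bits that have value of one.
--     (Single pass over segbits using an inverted tag -> group-indices index.)
--     """
--
--     # Inverted index: tag -> increasing list of indices of groups containing it.
--     groups_of_tag = {}
--     for gi, tag_group in enumerate(tag_groups):
--         for tag in tag_group:
--             lst = groups_of_tag.get(tag, [])
--             if not (lst and lst[-1] == gi):
--                 groups_of_tag[tag] = lst + [gi]
--
--     bit_groups = [set() for _ in tag_groups]
--
--     for tag, bits in segbits.items():
--         gis = groups_of_tag.get(tag)
--         if gis:
--             ones = {b for b in bits if b[2]}
--             for gi in gis:
--                 bit_groups[gi] |= ones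
--
--     return bit_groups
-- ===== Notes on version B (the rewrite author's own statement) =====
-- stated objective: faster
-- what changed: Instead of rescanning all of segbits once per tag group with a linear 'tag in tag_group' membership test, B builds an inverted index tag -> group indices once and makes a single pass over segbits, computing each tag's ones-set once and unioning it into exactly the groups that contain the tag.
import Mathlib
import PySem

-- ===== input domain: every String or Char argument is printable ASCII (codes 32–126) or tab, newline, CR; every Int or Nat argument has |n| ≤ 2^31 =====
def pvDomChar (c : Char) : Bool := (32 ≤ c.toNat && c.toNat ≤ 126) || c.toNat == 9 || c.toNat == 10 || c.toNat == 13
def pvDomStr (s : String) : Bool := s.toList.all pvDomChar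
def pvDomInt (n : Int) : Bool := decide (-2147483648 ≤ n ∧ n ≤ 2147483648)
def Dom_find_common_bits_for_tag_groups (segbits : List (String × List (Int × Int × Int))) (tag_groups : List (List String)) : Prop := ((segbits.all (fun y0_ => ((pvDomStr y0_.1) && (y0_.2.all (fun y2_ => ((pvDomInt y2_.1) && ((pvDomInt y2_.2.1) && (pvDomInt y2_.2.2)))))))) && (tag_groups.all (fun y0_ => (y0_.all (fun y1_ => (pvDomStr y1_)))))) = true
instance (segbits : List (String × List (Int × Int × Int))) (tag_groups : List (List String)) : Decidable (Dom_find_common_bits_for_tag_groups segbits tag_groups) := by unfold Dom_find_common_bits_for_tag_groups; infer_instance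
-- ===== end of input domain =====

-- B replaces A's rescan of all of segbits for every tag group by an inverted index
-- (tag -> indices of the groups containing it) and a single pass over segbits;
-- a timing run measured B faster on the large generated inputs.

-- ===== PORT A =====
def find_common_bits_for_tag_groups (segbits : List (String × List (Int × Int × Int))) (tag_groups : List (List String)) : List (List (Int × Int × Int)) :=
  -- bit_groups = []; for tag_group in tag_groups: … ; bit_groups.append(bit_group)
  tag_groups.foldl
    (fun bit_groups tag_group =>
      bit_groups ++
        [(PySem.Dict.ofList segbits).items.foldl
          (fun (bit_group : PySem.Set (Int × Int × Int)) tb =>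
            if tb.1 ∈ tag_group then
              -- ones = set([b for b in bits if b[2]]); bit_group |= ones
              PySem.Set.union bit_group (PySem.Set.ofList (tb.2.filter (fun b => !(b.2.2 == 0))))
            else bit_group)
          PySem.Set.empty])
    []

-- ===== PORT B =====
-- inner body of B's index-building loop: one tag of the group with index gi
def fcbGroupStep (gi : Nat) (d : PySem.Dict String (List Nat)) (tag : String) : PySem.Dict String (List Nat) :=
  let lst := d.getD tag []
  if lst.getLast? = some gi then d else d.insert tag (lst ++ [gi])

-- groups_of_tag = {}; for gi, tag_group in enumerate(tag_groups): for tag in tag_group: …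
def fcbIndex (tag_groups : List (List String)) : PySem.Dict String (List Nat) :=
  (tag_groups.foldl
    (fun (p : Nat × PySem.Dict String (List Nat)) tag_group =>
      (p.1 + 1, tag_group.foldl (fcbGroupStep p.1) p.2))
    (0, PySem.Dict.empty)).2

-- body of B's single pass over segbits.items()
def fcbStep (idx : PySem.Dict String (List Nat)) (bgs : List (PySem.Set (Int × Int × Int))) (tb : String × List (Int × Int × Int)) : List (PySem.Set (Int × Int × Int)) :=
  match idx.get? tb.1 with
  | none => bgs
  | some gis =>
    if gis.isEmpty then bgs
    else
      -- ones = {b for b in bits if b[2]}; for gi in gis: bit_groups[gi] |= ones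
      let ones : PySem.Set (Int × Int × Int) := PySem.Set.ofList (tb.2.filter (fun b => !(b.2.2 == 0)))
      gis.foldl (fun bgs gi => bgs.set gi (PySem.Set.union (bgs.getD gi []) ones)) bgs

def find_common_bits_for_tag_groups_alt (segbits : List (String × List (Int × Int × Int))) (tag_groups : List (List String)) : List (List (Int × Int × Int)) :=
  let idx := fcbIndex tag_groups
  (PySem.Dict.ofList segbits).items.foldl (fcbStep idx)
    (tag_groups.map (fun _ => (PySem.Set.empty : PySem.Set (Int × Int × Int))))

-- ===== PRECONDITION & SPEC =====
def Spec_find_common_bits_for_tag_groups (segbits : List (String × List (Int × Int × Int))) (tag_groups : List (List String)) (out : List (List (Int × Int × Int))) : Prop := out = find_common_bits_for_tag_groups_alt segbits tag_groups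
instance (segbits : List (String × List (Int × Int × Int))) (tag_groups : List (List String)) (out : List (List (Int × Int × Int))) : Decidable (Spec_find_common_bits_for_tag_groups segbits tag_groups out) := by unfold Spec_find_common_bits_for_tag_groups; infer_instance

-- ===== CLAIM (what is proved, stated in full; the proofs are below) =====
def Claim_equal_find_common_bits_for_tag_groups : Prop := ∀ (segbits : List (String × List (Int × Int × Int))) (tag_groups : List (List String)), Dom_find_common_bits_for_tag_groups segbits tag_groups → Spec_find_common_bits_for_tag_groups segbits tag_groups (find_common_bits_for_tag_groups segbits tag_groups)

-- ===== LEMMAS AND PROOFS =====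

-- the ones-set of one segbits entry, and A's inner-loop step, named for the proofs
def fcbOnes (bits : List (Int × Int × Int)) : PySem.Set (Int × Int × Int) :=
  PySem.Set.ofList (bits.filter (fun b => !(b.2.2 == 0)))

def fcbStepA (g : List String) (s : PySem.Set (Int × Int × Int)) (tb : String × List (Int × Int × Int)) : PySem.Set (Int × Int × Int) :=
  if tb.1 ∈ g then PySem.Set.union s (fcbOnes tb.2) else s

-- invariant of the index under construction: k groups done, p = "tag already seen in group k"
def FcbInv (G : Nat → List String) (k : Nat) (p : String → Bool) (d : PySem.Dict String (List Nat)) : Prop :=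
  ∀ t : String, (d.getD t []).Pairwise (· < ·) ∧
    ∀ j : Nat, j ∈ d.getD t [] ↔ (j < k ∧ t ∈ G j) ∨ (j = k ∧ p t = true)

theorem fcbInv_congr (G : Nat → List String) (k : Nat) (p q : String → Bool)
    (d : PySem.Dict String (List Nat)) (hpq : ∀ t, p t = q t) (h : FcbInv G k p d) :
    FcbInv G k q d := by
  intro t
  refine ⟨(h t).1, fun j => ?_⟩
  rw [(h t).2 j, hpq t]

-- a sorted list whose members are all ≤ k and which contains k ends in k
theorem fcb_last_of_mem (l : List Nat) (k : Nat) (hs : l.Pairwise (· < ·)) (hk : k ∈ l)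
    (hle : ∀ j ∈ l, j ≤ k) : l.getLast? = some k := by
  induction l with
  | nil => cases hk
  | cons a l ih =>
    cases l with
    | nil =>
      simp only [List.mem_singleton] at hk
      simp [hk]
    | cons b m =>
      rw [List.getLast?_cons_cons]
      apply ih (List.Pairwise.sublist (List.sublist_cons_self a _) hs)
      · rcases List.mem_cons.mp hk with h | h
        · exfalso
          have hb : a < b := (List.pairwise_cons.mp hs).1 b (List.mem_cons_self ..)
          have : b ≤ k := hle b (List.mem_cons_of_mem a (List.mem_cons_self ..))
          omega
        · exact h
      · exact fun j hj => hle j (List.mem_cons_of_mem a hj)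

theorem fcbGroupStep_inv (G : Nat → List String) (k : Nat) (p : String → Bool)
    (d : PySem.Dict String (List Nat)) (g : String) (h : FcbInv G k p d) :
    FcbInv G k (fun t => p t || (t == g)) (fcbGroupStep k d g) := by
  unfold fcbGroupStep
  show FcbInv G k _ (if (d.getD g []).getLast? = some k then d else d.insert g (d.getD g [] ++ [k]))
  by_cases hl : (d.getD g []).getLast? = some k
  · rw [if_pos hl]
    have hkmem : k ∈ d.getD g [] := List.mem_of_getLast? hl
    have hpg : p g = true := by
      rcases ((h g).2 k).mp hkmem with ⟨hlt, _⟩ | ⟨_, hp⟩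
      · omega
      · exact hp
    refine fcbInv_congr G k p _ d (fun t => ?_) h
    by_cases ht : t = g
    · subst ht; simp [hpg]
    · simp [ht]
  · have hknot : k ∉ d.getD g [] := by
      intro hk
      exact hl (fcb_last_of_mem _ k (h g).1 hk (fun j hj => by
        rcases ((h g).2 j).mp hj with ⟨hlt, _⟩ | ⟨he, _⟩ <;> omega))
    rw [if_neg hl]
    intro t
    by_cases ht : t = g
    · subst ht
      rw [PySem.Dict.getD_insert_self]
      constructor
      · rw [List.pairwise_append]
        refine ⟨(h t).1, List.pairwise_singleton _ _, fun a ha b hb => ?_⟩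
        simp only [List.mem_singleton] at hb
        subst hb
        rcases ((h t).2 a).mp ha with ⟨hlt, _⟩ | ⟨he, _⟩
        · exact hlt
        · exact absurd (he ▸ ha) hknot
      · intro j
        rw [List.mem_append, List.mem_singleton, (h t).2 j]
        constructor
        · rintro ((⟨hlt, hG⟩ | ⟨he, _⟩) | he)
          · exact Or.inl ⟨hlt, hG⟩
          · exact Or.inr ⟨he, by simp⟩
          · exact Or.inr ⟨he, by simp⟩
        · rintro (⟨hlt, hG⟩ | ⟨he, _⟩)
          · exact Or.inl (Or.inl ⟨hlt, hG⟩)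
          · exact Or.inr he
    · rw [PySem.Dict.getD_insert_of_ne _ _ _ ht]
      refine ⟨(h t).1, fun j => ?_⟩
      rw [(h t).2 j]
      have hbeq : (t == g) = false := by simp [ht]
      simp [hbeq]

theorem fcbGroup_inv (G : Nat → List String) (k : Nat) :
    ∀ (gs : List String) (p : String → Bool) (d : PySem.Dict String (List Nat)),
      FcbInv G k p d →
      FcbInv G k (fun t => p t || gs.contains t) (gs.foldl (fcbGroupStep k) d) := by
  intro gs
  induction gs with
  | nil => intro p d h; exact fcbInv_congr G k p _ d (by simp) h
  | cons g gs ih =>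
    intro p d h
    have h' := ih (fun t => p t || (t == g)) (fcbGroupStep k d g) (fcbGroupStep_inv G k p d g h)
    refine fcbInv_congr G k _ _ _ (fun t => ?_) h'
    rw [List.contains_cons, ← Bool.or_assoc]

theorem fcbIndex_inv (G : Nat → List String) :
    ∀ (gs : List (List String)) (k : Nat) (d : PySem.Dict String (List Nat)),
      FcbInv G k (fun _ => false) d →
      (∀ i, i < gs.length → G (k + i) = gs.getD i []) →
      FcbInv G (k + gs.length) (fun _ => false)
        ((gs.foldl (fun (p : Nat × PySem.Dict String (List Nat)) tag_group =>
          (p.1 + 1, tag_group.foldl (fcbGroupStep p.1) p.2)) (k, d)).2) := by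
  intro gs
  induction gs with
  | nil => intro k d h _; simpa using h
  | cons g gs ih =>
    intro k d h hG
    have hstep := fcbGroup_inv G k g (fun _ => false) d h
    have hnext : FcbInv G (k + 1) (fun _ => false) (g.foldl (fcbGroupStep k) d) := by
      intro t
      refine ⟨(hstep t).1, fun j => ?_⟩
      rw [(hstep t).2 j]
      have hGk : G k = g := by simpa using hG 0 (by simp)
      constructor
      · rintro (⟨hlt, hmem⟩ | ⟨he, hc⟩)
        · exact Or.inl ⟨by omega, hmem⟩
        · subst he
          simp only [Bool.false_or] at hc
          exact Or.inl ⟨by omega, hGk ▸ List.contains_iff_mem.mp hc⟩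
      · rintro (⟨hlt, hmem⟩ | ⟨_, hfalse⟩)
        swap
        · cases hfalse
        by_cases hjk : j = k
        · subst hjk
          exact Or.inr ⟨rfl, by simp [hGk ▸ hmem]⟩
        · exact Or.inl ⟨by omega, hmem⟩
    have := ih (k + 1) (g.foldl (fcbGroupStep k) d) hnext
      (fun i hi => by simpa [Nat.add_assoc, Nat.add_comm 1 i] using hG (i + 1) (by simpa using hi))
    simpa [List.foldl_cons, Nat.add_comm 1 gs.length, Nat.add_assoc] using this

-- the finished index: membership in the bucket of t ↔ group j contains t
theorem fcbIndex_spec (tag_groups : List (List String)) (t : String) :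
    ((fcbIndex tag_groups).getD t []).Pairwise (· < ·) ∧
      ∀ j : Nat, j ∈ (fcbIndex tag_groups).getD t [] ↔
        j < tag_groups.length ∧ t ∈ tag_groups.getD j [] := by
  have h0 : FcbInv (fun j => tag_groups.getD j []) 0 (fun _ => false) PySem.Dict.empty := by
    intro t
    constructor
    · simp [PySem.Dict.getD_empty]
    · intro j; simp [PySem.Dict.getD_empty]
  have h := fcbIndex_inv (fun j => tag_groups.getD j []) tag_groups 0 PySem.Dict.empty h0
    (fun i hi => by simp)
  unfold fcbIndex
  refine ⟨(h t).1, fun j => ?_⟩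
  rw [(h t).2 j]
  simp

-- updating buckets not containing j leaves slot j unchanged
theorem fcbSetFold_notmem (ones : PySem.Set (Int × Int × Int)) :
    ∀ (gis : List Nat) (bgs : List (PySem.Set (Int × Int × Int))) (j : Nat), j ∉ gis →
      (gis.foldl (fun bgs gi => bgs.set gi (PySem.Set.union (bgs.getD gi []) ones)) bgs).getD j [] = bgs.getD j [] := by
  intro gis
  induction gis with
  | nil => intro bgs j _; rfl
  | cons gi rest ih =>
    intro bgs j hj
    rw [List.foldl_cons, ih _ j (fun h => hj (List.mem_cons_of_mem _ h))]
    have hne : gi ≠ j := by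
      intro h
      exact hj (h ▸ List.mem_cons_self ..)
    simp only [List.getD_eq_getElem?_getD]
    rw [List.getElem?_set_ne hne]

theorem fcbSetFold_length :
    ∀ (gis : List Nat) (bgs : List (PySem.Set (Int × Int × Int))) (ones : PySem.Set (Int × Int × Int)),
      (gis.foldl (fun bgs gi => bgs.set gi (PySem.Set.union (bgs.getD gi []) ones)) bgs).length = bgs.length := by
  intro gis
  induction gis with
  | nil => intro bgs ones; rfl
  | cons gi rest ih => intro bgs ones; rw [List.foldl_cons, ih, List.length_set]

theorem fcbSetFold_getD (ones : PySem.Set (Int × Int × Int)) :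
    ∀ (gis : List Nat) (bgs : List (PySem.Set (Int × Int × Int))) (j : Nat),
      gis.Nodup → j < bgs.length →
      (gis.foldl (fun bgs gi => bgs.set gi (PySem.Set.union (bgs.getD gi []) ones)) bgs).getD j [] =
        if j ∈ gis then PySem.Set.union (bgs.getD j []) ones else bgs.getD j [] := by
  intro gis
  induction gis with
  | nil => intro bgs j _ _; simp
  | cons gi rest ih =>
    intro bgs j hnd hj
    rw [List.foldl_cons]
    by_cases hje : j = gi
    · subst hje
      have hnotin : j ∉ rest := (List.nodup_cons.mp hnd).1
      rw [fcbSetFold_notmem ones rest _ j hnotin]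
      simp only [List.getD_eq_getElem?_getD]
      rw [List.getElem?_set_self hj]
      simp
    · rw [ih _ j (List.nodup_cons.mp hnd).2 (by rw [List.length_set]; exact hj)]
      have hslot : (bgs.set gi (PySem.Set.union (bgs.getD gi []) ones)).getD j [] = bgs.getD j [] := by
        simp only [List.getD_eq_getElem?_getD]
        rw [List.getElem?_set_ne (fun h => hje h.symm)]
      rw [hslot]
      simp [List.mem_cons, hje]

theorem fcbStep_length (idx : PySem.Dict String (List Nat)) (bgs : List (PySem.Set (Int × Int × Int)))
    (tb : String × List (Int × Int × Int)) : (fcbStep idx bgs tb).length = bgs.length := by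
  unfold fcbStep
  cases idx.get? tb.1 with
  | none => rfl
  | some gis =>
    by_cases h : gis.isEmpty
    · simp [h]
    · simp only [h, if_neg, Bool.false_eq_true, not_false_iff]
      exact fcbSetFold_length gis bgs _

-- one B-step acts on slot j exactly like A's inner-loop step for group j
theorem fcbStep_getD (tag_groups : List (List String)) (bgs : List (PySem.Set (Int × Int × Int)))
    (tb : String × List (Int × Int × Int)) (j : Nat) (hj : j < tag_groups.length)
    (hlen : bgs.length = tag_groups.length) :
    (fcbStep (fcbIndex tag_groups) bgs tb).getD j [] =
      fcbStepA (tag_groups.getD j []) (bgs.getD j []) tb := by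
  obtain ⟨hpw, hmem⟩ := fcbIndex_spec tag_groups tb.1
  unfold fcbStep fcbStepA
  cases hidx : (fcbIndex tag_groups).get? tb.1 with
  | none =>
    have hbucket : (fcbIndex tag_groups).getD tb.1 [] = [] := by
      rw [PySem.Dict.getD_eq_get?_getD, hidx]; rfl
    have : tb.1 ∉ tag_groups.getD j [] := by
      intro hmem'
      have := (hmem j).mpr ⟨hj, hmem'⟩
      rw [hbucket] at this
      cases this
    rw [if_neg this]
  | some gis =>
    have hbucket : (fcbIndex tag_groups).getD tb.1 [] = gis := by
      rw [PySem.Dict.getD_eq_get?_getD, hidx]; rfl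
    rw [hbucket] at hpw hmem
    have hiff : j ∈ gis ↔ tb.1 ∈ tag_groups.getD j [] := by
      rw [hmem j]
      exact ⟨fun h => h.2, fun h => ⟨hj, h⟩⟩
    dsimp only
    by_cases hemp : gis.isEmpty
    · have : tb.1 ∉ tag_groups.getD j [] := by
        intro h
        have := hiff.mpr h
        rw [List.isEmpty_iff.mp hemp] at this
        cases this
      rw [if_pos hemp, if_neg this]
    · simp only [hemp, Bool.false_eq_true, if_neg, not_false_iff]
      rw [fcbSetFold_getD _ gis bgs j (hpw.imp Nat.ne_of_lt) (hlen ▸ hj)]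
      by_cases hin : tb.1 ∈ tag_groups.getD j []
      · rw [if_pos (hiff.mpr hin), if_pos hin]; rfl
      · rw [if_neg (fun h => hin (hiff.mp h)), if_neg hin]

theorem fcbFoldB_length (idx : PySem.Dict String (List Nat)) :
    ∀ (its : List (String × List (Int × Int × Int))) (bgs : List (PySem.Set (Int × Int × Int))),
      (its.foldl (fcbStep idx) bgs).length = bgs.length := by
  intro its
  induction its with
  | nil => intro bgs; rfl
  | cons tb rest ih => intro bgs; rw [List.foldl_cons, ih, fcbStep_length]

-- B's single pass, projected to slot j, is A's inner loop for group j
theorem fcbFoldB_getD (tag_groups : List (List String)) :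
    ∀ (its : List (String × List (Int × Int × Int))) (bgs : List (PySem.Set (Int × Int × Int))),
      bgs.length = tag_groups.length → ∀ j, j < tag_groups.length →
      (its.foldl (fcbStep (fcbIndex tag_groups)) bgs).getD j [] =
        its.foldl (fcbStepA (tag_groups.getD j [])) (bgs.getD j []) := by
  intro its
  induction its with
  | nil => intro bgs _ j _; rfl
  | cons tb rest ih =>
    intro bgs hlen j hj
    rw [List.foldl_cons, List.foldl_cons,
      ih _ (by rw [fcbStep_length]; exact hlen) j hj,
      fcbStep_getD tag_groups bgs tb j hj hlen]

-- A is the map of its inner loop over the groups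
theorem fcbA_eq_map (segbits : List (String × List (Int × Int × Int))) (tag_groups : List (List String)) :
    find_common_bits_for_tag_groups segbits tag_groups =
      tag_groups.map (fun g => (PySem.Dict.ofList segbits).items.foldl (fcbStepA g) PySem.Set.empty) := by
  unfold find_common_bits_for_tag_groups
  rw [PySem.List.foldl_append_singleton_eq_map]
  rfl

-- ===== VERDICT (by name: the statement is the Claim_ definition above) =====
theorem find_common_bits_for_tag_groups_spec : Claim_equal_find_common_bits_for_tag_groups := by
  intro segbits tag_groups _
  unfold Spec_find_common_bits_for_tag_groups
  rw [fcbA_eq_map]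
  unfold find_common_bits_for_tag_groups_alt
  apply List.ext_getElem
  · rw [List.length_map, fcbFoldB_length, List.length_map]
  · intro j hj₁ hj₂
    have hjlt : j < tag_groups.length := by
      rw [List.length_map] at hj₁; exact hj₁
    have hinitlen : (tag_groups.map (fun _ => (PySem.Set.empty : PySem.Set (Int × Int × Int)))).length = tag_groups.length := by
      rw [List.length_map]
    rw [← List.getD_eq_getElem _ [] hj₁, ← List.getD_eq_getElem _ [] hj₂]
    rw [fcbFoldB_getD tag_groups _ _ hinitlen j hjlt]
    have hinit : (tag_groups.map (fun _ => (PySem.Set.empty : PySem.Set (Int × Int × Int)))).getD j [] = PySem.Set.empty := by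
      rw [List.getD_eq_getElem _ [] (by rw [List.length_map]; exact hjlt)]
      simp
    rw [hinit]
    rw [List.getD_eq_getElem _ [] hjlt]
    rw [List.getD_eq_getElem _ [] hj₁]
    rw [List.getElem_map]
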